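-- pv_equiv track=rewrite | github.com/Pathlight/target-postgres | target_postgres/db_sync.py | most_general_type
-- ===== SOURCE A (Python) =====
-- JSONSCHEMA_TYPES = {
--     'string',
--     'number',
--     'integer',
--     'object',
--     'array',
--     'boolean',
--     'null',
-- }
--
-- _JSONSCHEMA_TYPE_CAN_CAST_TO = {
--     'string': JSONSCHEMA_TYPES,
--     'number': ('integer', 'boolean'),
--     'integer': ('boolean',),
--     'object': ('array',),
--     'array': (),
--     'boolean': (),
--     # We never want to cast a non-null to null
--     'null': ()
-- }
--
-- def get_usable_types(types):
--     # Null is not usable as a discrete type (all types are nullable)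
--     types = set(types) - {'null',}
--     # Return a new set that excludes any entry not in JSONSCHEMA_TYPES.
--     return JSONSCHEMA_TYPES.intersection(types)
--
-- def get_castable_types(target_type):
--     """
--     Returns the set of types that can be safely converted to target_type
--     """
--     accepts = set(_JSONSCHEMA_TYPE_CAN_CAST_TO.get(target_type, ()))
--     accepts |= {target_type,}
--     return get_usable_types(accepts)
--
-- def most_general_type(types):
--     """
--     Figures out the most general type in the list, which allows us to make a
--     more intelligent choice about which postgres data type to use.
--
--     A type G is generalizes to a type T iff `cast(t::T AS G)` losslessly
--     converts between the types without error. First we find the type that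
--     generalizes to the most other types in `types`. If that type can generalize
--     to every type in types, we return it. If it can't, then we return 'string',
--     as it is the most general type.
--     """
--     if not types:
--         return 'string'
--
--     types = get_usable_types(types)
--
--     best_score, best_type = 0, None
--
--     # Iterate over sorted types so that the same type always wins if two types
--     # have equal scores.
--     for t in sorted(types):
--         castable_types = get_castable_types(t)
--         # The score is the number of types in `types` that can be cast to the
--         # type `t`. The most general one is the one that accepts the most casts
--         # to it.
--         score = len(castable_types.intersection(types))
--         if score > best_score:
--             best_score, best_type = score, t
--
--     if best_type is None or not get_castable_types(best_type).issuperset(types):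
--         # bet_type is either None or can't accomodate all `types`, so return
--         # `string`, which is the most general type of all.
--         best_type = 'string'
--
--     return best_type
-- ===== SOURCE B (Python) =====
-- JSONSCHEMA_TYPES = {
--     'string',
--     'number',
--     'integer',
--     'object',
--     'array',
--     'boolean',
--     'null',
-- }
--
-- _JSONSCHEMA_TYPE_CAN_CAST_TO = {
--     'string': JSONSCHEMA_TYPES,
--     'number': ('integer', 'boolean'),
--     'integer': ('boolean',),
--     'object': ('array',),
--     'array': (),
--     'boolean': (),
--     'null': ()
-- }
--
-- def get_usable_types(types):
--     types = set(types) - {'null',}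
--     return JSONSCHEMA_TYPES.intersection(types)
--
-- def get_castable_types(target_type):
--     accepts = set(_JSONSCHEMA_TYPE_CAN_CAST_TO.get(target_type, ()))
--     accepts |= {target_type,}
--     return get_usable_types(accepts)
--
-- def most_general_type(types):
--     # Simpler: return the first type (in sorted order) that every usable type
--     # casts to; if none covers them all, 'string' is the most general type.
--     if not types:
--         return 'string'
--     usable = get_usable_types(types)
--     for t in sorted(usable):
--         if get_castable_types(t).issuperset(usable):
--             return t
--     return 'string'
-- ===== Notes on version B (the rewrite author's own statement) =====
-- stated objective: simpler
-- what changed: Replaced the score-counting argmax loop plus post-hoc superset check with a single early-return scan that returns the first sorted usable type whose castable set covers all usable types, falling back to 'string'.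
import Mathlib
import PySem

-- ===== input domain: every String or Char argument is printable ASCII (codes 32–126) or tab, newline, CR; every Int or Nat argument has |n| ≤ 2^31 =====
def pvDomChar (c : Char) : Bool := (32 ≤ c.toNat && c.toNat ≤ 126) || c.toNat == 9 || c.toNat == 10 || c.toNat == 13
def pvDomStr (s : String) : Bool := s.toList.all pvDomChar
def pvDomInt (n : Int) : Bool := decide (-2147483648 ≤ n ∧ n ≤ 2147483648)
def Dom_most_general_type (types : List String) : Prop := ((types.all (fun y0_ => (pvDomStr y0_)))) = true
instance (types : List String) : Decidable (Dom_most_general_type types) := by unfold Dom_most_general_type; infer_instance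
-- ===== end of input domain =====

-- B replaces A's score/argmax loop by an early-return scan of sorted(usable) for the
-- first type whose castable set covers all usable types (objective: simpler).

-- ===== PORT A =====
-- shared module constants/helpers (both Python versions use the same ones)
def JSONSCHEMA_TYPES : PySem.Set String :=
  PySem.Set.ofList ["string","number","integer","object","array","boolean","null"]

-- _JSONSCHEMA_TYPE_CAN_CAST_TO.get(target_type, ()) as a list of its entries
def canCastTo (target_type : String) : List String :=
  if target_type == "string" then ["string","number","integer","object","array","boolean","null"]
  else if target_type == "number" then ["integer","boolean"]
  else if target_type == "integer" then ["boolean"]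
  else if target_type == "object" then ["array"]
  else if target_type == "array" then []
  else if target_type == "boolean" then []
  else if target_type == "null" then []
  else []

def get_usable_types (types : List String) : PySem.Set String :=
  PySem.Set.inter JSONSCHEMA_TYPES
    (PySem.Set.diff (PySem.Set.ofList types) (PySem.Set.ofList ["null"]))

def get_castable_types (target_type : String) : PySem.Set String :=
  get_usable_types (PySem.Set.add (PySem.Set.ofList (canCastTo target_type)) target_type)

-- A's loop: best_score, best_type over sorted(types), keeping a strictly better score
def aLoop (u : PySem.Set String) : Int × Option String :=
  (PySem.List.sorted u (fun t => t.toList) false).foldl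
    (fun st t =>
      let castable_types := get_castable_types t
      let score : Int := PySem.Set.len (PySem.Set.inter castable_types u)
      if score > st.1 then (score, some t) else st)
    (0, none)

def most_general_type (types : List String) : String :=
  if types.isEmpty then "string"
  else
    let u := get_usable_types types
    let best := aLoop u
    match best.2 with
    | none => "string"
    | some best_type =>
        if PySem.Set.issuperset (get_castable_types best_type) u then best_type else "string"

-- ===== PORT B =====
-- B's loop: first t in sorted(usable) whose castable set covers usable, else "string"
def bFind (ts : List String) (usable : PySem.Set String) : String :=
  match ts with
  | [] => "string"
  | t :: rest =>
      if PySem.Set.issuperset (get_castable_types t) usable then t else bFind rest usable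

def most_general_type_alt (types : List String) : String :=
  if types.isEmpty then "string"
  else
    let usable := get_usable_types types
    bFind (PySem.List.sorted usable (fun t => t.toList) false) usable

-- ===== PRECONDITION & SPEC =====
def Spec_most_general_type (types : List String) (out : String) : Prop := out = most_general_type_alt types
instance (types : List String) (out : String) : Decidable (Spec_most_general_type types out) := by unfold Spec_most_general_type; infer_instance

-- ===== CLAIM (what is proved, stated in full; the proofs are below) =====
def Claim_equal_most_general_type : Prop := ∀ (types : List String), Dom_most_general_type types → Spec_most_general_type types (most_general_type types)

-- ===== LEMMAS AND PROOFS =====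

-- the usable set is always the corresponding sublist of the six non-null schema types
theorem usable_eq (types : List String) :
    get_usable_types types
      = (["string","number","integer","object","array","boolean"].filter
          (fun x => decide (x ∈ types))) := by
  unfold get_usable_types
  rw [show JSONSCHEMA_TYPES = ["string","number","integer","object","array","boolean","null"] from by decide]
  simp [PySem.Set.inter, List.filter_cons, PySem.Set.mem_diff, PySem.Set.mem_ofList]

-- both tails agree on every one of the 64 possible usable sets
theorem tails_eq (b1 b2 b3 b4 b5 b6 : Bool) :
    (let u := (if b1 then ["string"] else []) ++ (if b2 then ["number"] else [])
        ++ (if b3 then ["integer"] else []) ++ (if b4 then ["object"] else [])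
        ++ (if b5 then ["array"] else []) ++ (if b6 then ["boolean"] else [])
     (match (aLoop u).2 with
      | none => "string"
      | some best_type =>
          if PySem.Set.issuperset (get_castable_types best_type) u then best_type
          else "string")
      = bFind (PySem.List.sorted u (fun t => t.toList) false) u) := by
  revert b1 b2 b3 b4 b5 b6; decide

-- ===== VERDICT (by name: the statement is the Claim_ definition above) =====
theorem most_general_type_spec : Claim_equal_most_general_type := by
  intro types _
  unfold Spec_most_general_type most_general_type most_general_type_alt
  by_cases h : types.isEmpty
  · simp [h]
  · simp only [h]
    rw [usable_eq]
    simp only [List.filter_cons, List.filter_nil]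
    have := tails_eq (decide ("string" ∈ types)) (decide ("number" ∈ types))
      (decide ("integer" ∈ types)) (decide ("object" ∈ types))
      (decide ("array" ∈ types)) (decide ("boolean" ∈ types))
    generalize decide ("string" ∈ types) = b1 at this ⊢
    generalize decide ("number" ∈ types) = b2 at this ⊢
    generalize decide ("integer" ∈ types) = b3 at this ⊢
    generalize decide ("object" ∈ types) = b4 at this ⊢
    generalize decide ("array" ∈ types) = b5 at this ⊢
    generalize decide ("boolean" ∈ types) = b6 at this ⊢
    cases b1 <;> cases b2 <;> cases b3 <;> cases b4 <;> cases b5 <;> cases b6 <;>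
      simpa using this
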